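-- pv_equiv track=rewrite | github.com/LRedolfi/Proyectos | ubbi_dubbi.py | ubbi_dubbi
-- ===== SOURCE A (Python) =====
-- def ubbi_dubbi(frase): #Defino la función
--     frase_convertida="" #Defino una cadena vacía para armar la frase final
--     largo_frase=len(frase) #Obtengo el largo de la frase
--     pos_ult_espacio=0 #Posición del ultimo espacio encontrado
--     aux_paso_primer_espacio=0 #Variable auxiliar de paso por primer espacio
--     for posición in range(0,largo_frase): #Recorro la frase posición por posición
--         if frase[posición]==" ": #Al encontrar un espacio
--             palabra=frase[pos_ult_espacio+aux_paso_primer_espacio:posición] #Tomo la palabra como substring desde la posición del ultimo espacio encontrado hasta la posición actual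
--             aux_paso_primer_espacio=1 #Como pase por el primer espacio, cambio el valor de la auxiliar
--             pos_ult_espacio=posición #Actualizo la posición del ultimo espacio encontrado
--             nueva_palabra="" #Defino un string vacío
--             for carácter in palabra: #Recorro cada carácter de la palabra
--                 if carácter in "aeiou": #Si es una vocal
--                     carácter="ub"+carácter #Lo modifico agregando ub antes
--                 nueva_palabra=nueva_palabra+carácter #Concateno para ir armando la nueva palabra
--             frase_convertida=frase_convertida+nueva_palabra+" " #Concateno los resultados
--         elif posición==largo_frase-1: #Si llego a la ultima posición de la frase
--             palabra=frase[pos_ult_espacio+aux_paso_primer_espacio:] #Tomo la palabra como substring desde la posición del ultimo espacio encontrado hasta la posición final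
--             nueva_palabra_final="" #Defino un string vacío
--             for carácter in palabra: #Recorro cada carácter de la palabra
--                 if carácter in "aeiou": #Si es una vocal
--                     carácter="ub"+carácter #Lo modifico agregando ub antes
--                 nueva_palabra_final=nueva_palabra_final+carácter #Concateno para ir armando la nueva palabra
--             frase_convertida=frase_convertida+nueva_palabra_final #Concateno los resultados
--     return frase_convertida #Retorno la nueva frase
-- ===== SOURCE B (Python) =====
-- def ubbi_dubbi(frase):
--     resultado = ""
--     for c in frase:
--         if c in "aeiou":
--             resultado += "ub" + c
--         else:
--             resultado += c
--     return resultado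
-- ===== Notes on version B (the rewrite author's own statement) =====
-- stated objective: simpler
-- what changed: Replaced A's word-splitting machinery (last-space index, first-space flag, per-word substrings and nested inner loops) with a single flat pass over the characters that emits the vowel prefix inline.
import Mathlib
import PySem

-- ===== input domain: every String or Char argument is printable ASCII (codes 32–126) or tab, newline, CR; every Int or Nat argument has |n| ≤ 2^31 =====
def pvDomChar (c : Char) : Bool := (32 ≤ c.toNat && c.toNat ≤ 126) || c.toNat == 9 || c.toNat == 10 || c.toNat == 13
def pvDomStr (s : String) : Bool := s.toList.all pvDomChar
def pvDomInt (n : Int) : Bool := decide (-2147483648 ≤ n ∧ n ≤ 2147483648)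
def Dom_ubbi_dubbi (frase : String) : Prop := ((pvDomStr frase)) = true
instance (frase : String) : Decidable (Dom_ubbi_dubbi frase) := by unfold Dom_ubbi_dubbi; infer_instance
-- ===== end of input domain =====

-- B replaces A's word-splitting and last-space bookkeeping by one flat per-character pass (simpler; same values).

-- ===== PORT A =====
-- inner loop of A: for carácter in palabra: if carácter in "aeiou": carácter = "ub"+carácter; nueva += carácter
def pvWordA (w : List Char) : List Char :=
  w.foldl (fun acc c => acc ++ (if c ∈ ['a','e','i','o','u'] then ['u','b'] ++ [c] else [c])) []

-- one iteration of A's outer loop; state s = (frase_convertida, pos_ult_espacio, aux_paso_primer_espacio).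
-- indices p and last+aux are nonnegative, so Nat-side getD/slice are exact for frase[p], frase[a:p], frase[a:].
def pvStepA (l : List Char) (n : Nat) (s : List Char × Nat × Nat) (p : Nat) : List Char × Nat × Nat :=
  if l.getD p ' ' = ' ' then
    (s.1 ++ pvWordA (PySem.List.slice l (some ((s.2.1 + s.2.2 : Nat) : Int)) (some ((p : Nat) : Int))) ++ [' '], p, 1)
  else if p = n - 1 then
    (s.1 ++ pvWordA (PySem.List.slice l (some ((s.2.1 + s.2.2 : Nat) : Int)) none), s.2.1, s.2.2)
  else
    s

def ubbi_dubbi (frase : String) : String :=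
  let l := frase.toList
  let n := l.length
  String.ofList ((List.range n).foldl (pvStepA l n) ([], 0, 0)).1

-- ===== PORT B =====
def ubbi_dubbi_alt (frase : String) : String :=
  String.ofList (frase.toList.foldl
    (fun acc c => acc ++ (if c ∈ ['a','e','i','o','u'] then ['u','b',c] else [c])) [])

-- ===== PRECONDITION & SPEC =====
def Spec_ubbi_dubbi (frase : String) (out : String) : Prop := out = ubbi_dubbi_alt frase
instance (frase : String) (out : String) : Decidable (Spec_ubbi_dubbi frase out) := by unfold Spec_ubbi_dubbi; infer_instance

-- ===== CLAIM (what is proved, stated in full; the proofs are below) =====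
def Claim_equal_ubbi_dubbi : Prop := ∀ (frase : String), Dom_ubbi_dubbi frase → Spec_ubbi_dubbi frase (ubbi_dubbi frase)

-- ===== LEMMAS AND PROOFS =====

-- the per-character emission both programs perform
def pvG (c : Char) : List Char := if c ∈ ['a','e','i','o','u'] then ['u','b',c] else [c]

lemma pvFold_eq_flatMap (xs acc : List Char) :
    xs.foldl (fun acc c => acc ++ (if c ∈ ['a','e','i','o','u'] then ['u','b',c] else [c])) acc
      = acc ++ xs.flatMap pvG := by
  induction xs generalizing acc with
  | nil => simp
  | cons x xs ih => rw [List.foldl_cons, ih, List.flatMap_cons]; simp [pvG, List.append_assoc]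

lemma pvWordA_eq (w : List Char) : pvWordA w = w.flatMap pvG := by
  have h := pvFold_eq_flatMap w []
  simpa [pvWordA] using h

-- after A's space branch at position p (with last+aux ≤ p < length), the output is the flat image of the first p+1 chars
lemma pvSpace_algebra (l : List Char) (k p : Nat) (hkp : k ≤ p) (hp : p < l.length)
    (hsp : l.getD p ' ' = ' ') :
    (l.take k).flatMap pvG ++ pvWordA (PySem.List.slice l (some (k : Int)) (some (p : Int))) ++ [' ']
      = (l.take (p + 1)).flatMap pvG := by
  rw [pvWordA_eq, PySem.List.slice_natCast]
  have hl : l[p] = ' ' := by rwa [List.getD_eq_getElem l ' ' hp] at hsp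
  have hsplit : l.take p = l.take k ++ (l.drop k).take (p - k) := by
    conv_lhs => rw [← Nat.add_sub_cancel' hkp, List.take_add]
  rw [List.take_add_one, List.getElem?_eq_getElem hp, hsplit]
  simp [pvG, hl]

-- invariant of A's outer loop over positions 0..m-1 (m below the last index): output so far is the flat image
-- of the first (pos_ult_espacio + aux) characters
lemma pvLoop_inv (l : List Char) (j : Nat) (hlen : l.length = j + 1) :
    ∀ m, m ≤ j →
      (((List.range m).foldl (pvStepA l (j + 1)) ([], 0, 0)).1
          = (l.take (((List.range m).foldl (pvStepA l (j + 1)) ([], 0, 0)).2.1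
              + ((List.range m).foldl (pvStepA l (j + 1)) ([], 0, 0)).2.2)).flatMap pvG)
        ∧ ((List.range m).foldl (pvStepA l (j + 1)) ([], 0, 0)).2.1
            + ((List.range m).foldl (pvStepA l (j + 1)) ([], 0, 0)).2.2 ≤ m := by
  intro m
  induction m with
  | zero => intro _; simp
  | succ m ih =>
    intro hm
    have hmj : m ≤ j := Nat.le_of_succ_le hm
    obtain ⟨hout, hk⟩ := ih hmj
    rw [List.range_succ, List.foldl_append, List.foldl_cons, List.foldl_nil]
    set s := (List.range m).foldl (pvStepA l (j + 1)) ([], 0, 0) with hs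
    have hmlen : m < l.length := by omega
    by_cases hsp : l.getD m ' ' = ' '
    · refine ⟨?_, ?_⟩
      · rw [pvStepA, if_pos hsp, hout]
        exact pvSpace_algebra l (s.2.1 + s.2.2) m hk hmlen hsp
      · rw [pvStepA, if_pos hsp]
    · have hne : m ≠ j + 1 - 1 := by omega
      rw [pvStepA, if_neg hsp, if_neg hne]
      exact ⟨hout, Nat.le_succ_of_le hk⟩

-- the whole outer loop produces the flat image of the whole string
lemma pvLoop (l : List Char) (j : Nat) (hlen : l.length = j + 1) :
    ((List.range (j + 1)).foldl (pvStepA l (j + 1)) ([], 0, 0)).1 = l.flatMap pvG := by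
  obtain ⟨hout, hk⟩ := pvLoop_inv l j hlen j le_rfl
  rw [List.range_succ, List.foldl_append, List.foldl_cons, List.foldl_nil]
  set s := (List.range j).foldl (pvStepA l (j + 1)) ([], 0, 0) with hs
  have hjlen : j < l.length := by omega
  by_cases hsp : l.getD j ' ' = ' '
  · rw [pvStepA, if_pos hsp, hout]
    have := pvSpace_algebra l (s.2.1 + s.2.2) j hk hjlen hsp
    rw [this, show j + 1 = l.length from hlen.symm, List.take_length]
  · have hj : j = j + 1 - 1 := by omega
    rw [pvStepA, if_neg hsp, if_pos hj]
    rw [pvWordA_eq, PySem.List.slice_from_natCast, hout, ← List.flatMap_append,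
      List.take_append_drop]

-- ===== VERDICT (by name: the statement is the Claim_ definition above) =====
theorem ubbi_dubbi_spec : Claim_equal_ubbi_dubbi := by
  intro frase _
  show ubbi_dubbi frase = ubbi_dubbi_alt frase
  rw [ubbi_dubbi, ubbi_dubbi_alt, pvFold_eq_flatMap, List.nil_append]
  cases hl : frase.toList.length with
  | zero => simp [List.length_eq_zero_iff.mp hl]
  | succ j => exact congrArg String.ofList (pvLoop frase.toList j hl)
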